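-- pv_equiv track=rewrite | github.com/uprety/kattis-solution-python | sumkindofproblem.py | sumkindofproblem
-- ===== SOURCE A (Python) =====
-- def sumkindofproblem(N):
--     s1 = 0
--     for i in range(N + 1):
--         s1 += i
--
--     c1 = -1
--     s2 = 0
--     for i in range(N):
--         c1 += 2
--         s2 += c1
--
--     c2 = 0
--     s3 = 0
--     for i in range(N):
--         c2 += 2
--         s3 += c2
--
--     return (map(str, ((s1, s2, s3))))
-- ===== SOURCE B (Python) =====
-- def sumkindofproblem(N):
--     m = max(N, 0)
--     return map(str, (m * (m + 1) // 2, m * m, m * (m + 1)))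
-- ===== Notes on version B (the rewrite author's own statement) =====
-- stated objective: faster
-- what changed: Replaces the three O(N) accumulation loops by the closed-form triangular, square and pronic formulas applied to N clamped to be nonnegative.
import Mathlib
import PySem

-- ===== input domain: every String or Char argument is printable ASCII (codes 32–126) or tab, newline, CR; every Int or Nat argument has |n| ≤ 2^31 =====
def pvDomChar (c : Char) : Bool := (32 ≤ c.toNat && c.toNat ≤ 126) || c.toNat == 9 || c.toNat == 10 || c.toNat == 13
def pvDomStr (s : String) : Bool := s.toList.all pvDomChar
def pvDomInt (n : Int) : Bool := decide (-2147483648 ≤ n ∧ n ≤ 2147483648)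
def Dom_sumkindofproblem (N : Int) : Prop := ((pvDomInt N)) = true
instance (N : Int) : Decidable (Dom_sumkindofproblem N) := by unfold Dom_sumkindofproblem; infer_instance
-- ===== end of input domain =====

-- B replaces A's three O(N) accumulation loops with closed-form formulas (asymptotically faster).

-- ===== PORT A =====
def sumkindofproblem (N : Int) : List String :=
  let s1 := (PySem.List.pyRange 0 (N + 1) 1).foldl (fun s i => s + i) 0
  let p  := (PySem.List.pyRange 0 N 1).foldl
              (fun (p : Int × Int) _ => (p.1 + 2, p.2 + (p.1 + 2))) (-1, 0)
  let q  := (PySem.List.pyRange 0 N 1).foldl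
              (fun (q : Int × Int) _ => (q.1 + 2, q.2 + (q.1 + 2))) (0, 0)
  [PySem.Int.toStr s1, PySem.Int.toStr p.2, PySem.Int.toStr q.2]

-- ===== PORT B =====
def sumkindofproblem_alt (N : Int) : List String :=
  let m := max N 0
  [PySem.Int.toStr (PySem.Int.floordiv (m * (m + 1)) 2),
   PySem.Int.toStr (m * m),
   PySem.Int.toStr (m * (m + 1))]

-- ===== PRECONDITION & SPEC =====
def Spec_sumkindofproblem (N : Int) (out : List String) : Prop := out = sumkindofproblem_alt N
instance (N : Int) (out : List String) : Decidable (Spec_sumkindofproblem N out) := by unfold Spec_sumkindofproblem; infer_instance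

-- ===== CLAIM (what is proved, stated in full; the proofs are below) =====
def Claim_equal_sumkindofproblem : Prop := ∀ (N : Int), Dom_sumkindofproblem N → Spec_sumkindofproblem N (sumkindofproblem N)

-- ===== LEMMAS AND PROOFS =====

-- twice the first loop's sum is n(n-1)
lemma pv_two_mul_sum (n : Nat) :
    2 * (PySem.List.pyRange 0 (n : Int) 1).foldl (fun s i => s + i) 0
      = (n : Int) * ((n : Int) - 1) := by
  induction n with
  | zero => simp [PySem.List.pyRange_one_eq_nil]
  | succ k ih =>
    have h : ((k : Int) + 1) = ((k : Int) + 1) := rfl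
    rw [show ((k + 1 : Nat) : Int) = (k : Int) + 1 by push_cast; ring,
        PySem.List.pyRange_one_succ_right (by positivity)]
    rw [List.foldl_append]
    simp only [List.foldl]
    ring_nf
    ring_nf at ih
    omega

-- the second/third loops: value after n iterations from (c0, s0)
lemma pv_pair_loop (n : Nat) (c0 s0 : Int) :
    (PySem.List.pyRange 0 (n : Int) 1).foldl
        (fun (p : Int × Int) _ => (p.1 + 2, p.2 + (p.1 + 2))) (c0, s0)
      = (c0 + 2 * n, s0 + n * c0 + n * ((n : Int) + 1)) := by
  induction n generalizing c0 s0 with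
  | zero => simp [PySem.List.pyRange_one_eq_nil]
  | succ k ih =>
    rw [show ((k + 1 : Nat) : Int) = (k : Int) + 1 by push_cast; ring,
        PySem.List.pyRange_one_succ_right (by positivity)]
    rw [List.foldl_append]
    simp only [List.foldl, ih]
    exact Prod.ext (by push_cast; ring) (by push_cast; ring)

-- ===== VERDICT (by name: the statement is the Claim_ definition above) =====
theorem sumkindofproblem_spec : Claim_equal_sumkindofproblem := by
  intro N _
  unfold Spec_sumkindofproblem sumkindofproblem sumkindofproblem_alt
  rcases Decidable.em (0 ≤ N) with h | h
  · obtain ⟨n, rfl⟩ := Int.eq_ofNat_of_zero_le h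
    have hm : max (n : Int) 0 = (n : Int) := by omega
    have h1 := pv_two_mul_sum (n + 1)
    rw [show ((n + 1 : Nat) : Int) = (n : Int) + 1 by push_cast; ring] at h1
    have h1' : 2 * (PySem.List.pyRange 0 ((n : Int) + 1) 1).foldl (fun s i => s + i) 0
        = (n : Int) * ((n : Int) + 1) := by rw [h1]; ring
    have h2 := pv_pair_loop n (-1) 0
    have h3 := pv_pair_loop n 0 0
    simp only [hm, h2, h3]
    have hfd : PySem.Int.floordiv ((n : Int) * ((n : Int) + 1)) 2
        = (n : Int) * ((n : Int) + 1) / 2 :=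
      PySem.Int.floordiv_eq_ediv_of_pos (by norm_num)
    have hs1 : (PySem.List.pyRange 0 ((n : Int) + 1) 1).foldl (fun s i => s + i) 0
        = (n : Int) * ((n : Int) + 1) / 2 := by omega
    rw [hs1, hfd]
    congr 2 <;> ring
  · have h : N < 0 := by omega
    have hm : max N 0 = 0 := by omega
    rw [PySem.List.pyRange_one_eq_nil (by omega), PySem.List.pyRange_one_eq_nil (by omega), hm]
    norm_num [PySem.Int.floordiv]
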